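-- pv_equiv track=rewrite | github.com/AmitKulkarni23/Leet_HackerRank | LeetCode/Medium/DFS/439_ternary_expression_parser.py | parseTernary
-- ===== SOURCE A (Python) =====
-- def parseTernary(expression):
--     """
--     :type expression: str
--     :rtype: str
--     """
--     while len(expression) > 2:
--         count = 0
--         for x in range(2, len(expression)):
--             if expression[x] == '?':
--                 count += 1
--             elif expression[x] == ':':
--                 count -= 1
--                 if count == -1:
--                     if expression[0] == 'T':
--                         expression = expression[2:x]
--                     else:
--                         expression = expression[x+1:]
--                     break
--         else:
--             return expression
--
--     return expression
-- ===== SOURCE B (Python) =====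
-- def parseTernary(expression):
--     """
--     :type expression: str
--     :rtype: str
--     """
--     s = expression
--     n = len(s)
--     # nxt[p] = first index x >= p where the ':'/'?' balance of s[p:x+1] dips below zero
--     # (the colon that would make A's scan break when it starts counting at p), or n if none
--     nxt = [n] * n
--     stack = []
--     for p in range(n - 1, -1, -1):
--         c = s[p]
--         if c == ':':
--             stack.append(p)
--         elif c == '?':
--             if stack:
--                 stack.pop()
--         nxt[p] = stack[-1] if stack else n
--     i, j = 0, n
--     while j - i > 2:
--         x = nxt[i + 2]
--         if x >= j:
--             break
--         if s[i] == 'T':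
--             i, j = i + 2, x
--         else:
--             i, j = x + 1, j
--     return s[i:j]
-- ===== Notes on version B (the rewrite author's own statement) =====
-- stated objective: alternative
-- what changed: A repeatedly rescans the string from scratch to find the colon on which its reduction breaks and then slices (one scan and copy per reduction); B precomputes all break colons in a single right-to-left stack pass and then walks an index window over the original string, slicing once at the end.
import Mathlib
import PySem

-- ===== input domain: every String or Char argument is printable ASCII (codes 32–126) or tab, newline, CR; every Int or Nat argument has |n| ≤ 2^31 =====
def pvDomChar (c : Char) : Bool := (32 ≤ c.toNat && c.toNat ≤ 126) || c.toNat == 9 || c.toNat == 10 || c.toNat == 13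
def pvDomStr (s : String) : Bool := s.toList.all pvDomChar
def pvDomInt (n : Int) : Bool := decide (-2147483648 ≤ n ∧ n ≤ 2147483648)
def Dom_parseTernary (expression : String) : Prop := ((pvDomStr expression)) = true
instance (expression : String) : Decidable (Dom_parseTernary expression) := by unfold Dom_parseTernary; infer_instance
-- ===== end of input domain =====

-- B replaces A's repeated rescan-and-slice reduction loop by a single right-to-left pass that
-- precomputes, for every start position, the colon on which A's scan would break, and then walks
-- an index window through the original string; the return values agree on EVERY string.

-- ===== PORT A =====
-- the inner `for x in range(2, len(expression))` loop, walking the characters from index 2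
-- (the suffix expression[2:]) with x the running index: some x = break at x, none = for-else
def pvFindA : List Char → Nat → Int → Option Nat
  | [], _, _ => none
  | ch :: rest, x, count =>
    if ch = '?' then pvFindA rest (x + 1) (count + 1)
    else if ch = ':' then
      (if count - 1 = -1 then some x else pvFindA rest (x + 1) (count - 1))
    else pvFindA rest (x + 1) count

-- needed by pvA's decreasing_by: a found break position lies in [x, x + len)
theorem pvFindA_bounds : ∀ (s : List Char) (x : Nat) (c : Int) (y : Nat),
    pvFindA s x c = some y → x ≤ y ∧ y < x + s.length := by
  intro s
  induction s with
  | nil => intro x c y h; simp [pvFindA] at h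
  | cons ch rest ih =>
    intro x c y h
    simp only [pvFindA] at h
    split_ifs at h with h1 h2 h3
    · have := ih (x + 1) (c + 1) y h; simp only [List.length_cons]; omega
    · simp only [Option.some.injEq] at h; simp only [List.length_cons]; omega
    · have := ih (x + 1) (c - 1) y h; simp only [List.length_cons]; omega
    · have := ih (x + 1) c y h; simp only [List.length_cons]; omega

theorem pvA_dec1 (l : List Char) (x : Nat) (hlen : 2 < l.length)
    (hf : pvFindA (l.drop 2) 2 0 = some x) :
    (PySem.List.slice l (some (2 : Int)) (some (x : Int))).length < l.length := by
  have hb := pvFindA_bounds (l.drop 2) 2 0 x hf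
  have h2 : PySem.List.slice l (some (2 : Int)) (some (x : Int)) = (l.drop 2).take (x - 2) := by
    exact_mod_cast PySem.List.slice_natCast l 2 x
  rw [h2]
  simp only [List.length_take, List.length_drop] at *
  omega

theorem pvA_dec2 (l : List Char) (x : Nat) (hlen : 2 < l.length)
    (hf : pvFindA (l.drop 2) 2 0 = some x) :
    (PySem.List.slice l (some ((x : Int) + 1)) none).length < l.length := by
  have hb := pvFindA_bounds (l.drop 2) 2 0 x hf
  have h2 : PySem.List.slice l (some ((x : Int) + 1)) none = l.drop (x + 1) := by
    exact_mod_cast PySem.List.slice_from_natCast l (x + 1)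
  rw [h2]
  simp only [List.length_drop] at *
  omega

-- the outer while loop (on the character list of the string)
def pvA (l : List Char) : List Char :=
  if hlen : 2 < l.length then
    match hf : pvFindA (l.drop 2) 2 0 with
    | some x =>
        if (PySem.List.pyGet? l 0).getD ' ' = 'T' then
          pvA (PySem.List.slice l (some (2 : Int)) (some (x : Int)))   -- expression[2:x]
        else
          pvA (PySem.List.slice l (some ((x : Int) + 1)) none)         -- expression[x+1:]
    | none => l
  else l
termination_by l.length
decreasing_by
  · exact pvA_dec1 l x hlen hf
  · exact pvA_dec2 l x hlen hf

def parseTernary (expression : String) : String :=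
  String.mk (pvA expression.toList)

-- ===== PORT B =====
-- the `for p in range(n - 1, -1, -1)` pass of Source B as a right fold over the characters:
-- returns (stack, nxt-entries for this suffix); nxt[p] = stack top after processing p, else n
def pvStkNxt (n : Nat) : List Char → Nat → List Nat × List Nat
  | [], _ => ([], [])
  | ch :: rest, p =>
    let r := pvStkNxt n rest (p + 1)
    let st := if ch = ':' then p :: r.1 else if ch = '?' then r.1.drop 1 else r.1
    (st, st.headD n :: r.2)

-- the `while j - i > 2` loop of Source B; `fuel = n + 1` only makes the recursion structural
-- (j - i strictly decreases each iteration, so the fuel never runs out)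
def pvBWin (s : List Char) (nxt : List Nat) : Nat → Nat → Nat → Nat × Nat
  | 0, i, j => (i, j)
  | fuel + 1, i, j =>
    if 2 < j - i then
      let x := nxt.getD (i + 2) 0
      if x < j then
        if (PySem.List.pyGet? s (i : Int)).getD ' ' = 'T' then pvBWin s nxt fuel (i + 2) x
        else pvBWin s nxt fuel (x + 1) j
      else (i, j)
    else (i, j)

def parseTernary_alt (expression : String) : String :=
  String.mk (PySem.List.slice expression.toList
    (some ((pvBWin expression.toList (pvStkNxt expression.toList.length expression.toList 0).2
        (expression.toList.length + 1) 0 expression.toList.length).1 : Int))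
    (some ((pvBWin expression.toList (pvStkNxt expression.toList.length expression.toList 0).2
        (expression.toList.length + 1) 0 expression.toList.length).2 : Int)))

-- ===== PRECONDITION & SPEC =====
-- (no Pre_: the Python A returns normally on every string, and B agrees on every string)

def Spec_parseTernary (expression : String) (out : String) : Prop := out = parseTernary_alt expression
instance (expression : String) (out : String) : Decidable (Spec_parseTernary expression out) := by
  unfold Spec_parseTernary; infer_instance

-- ===== CLAIM (what is proved, stated in full; the proofs are below) =====
def Claim_equal_parseTernary : Prop := ∀ (expression : String), Dom_parseTernary expression → Spec_parseTernary expression (parseTernary expression)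

-- ===== LEMMAS AND PROOFS =====

-- proof-side spec of Source B's stack: the unmatched-colon positions of the suffix starting at p
def pvStk : List Char → Nat → List Nat
  | [], _ => []
  | ch :: rest, p =>
    if ch = ':' then p :: pvStk rest (p + 1)
    else if ch = '?' then (pvStk rest (p + 1)).drop 1
    else pvStk rest (p + 1)

theorem pvStkNxt_fst (n : Nat) : ∀ (u : List Char) (p : Nat), (pvStkNxt n u p).1 = pvStk u p := by
  intro u
  induction u with
  | nil => intro p; rfl
  | cons ch rest ih => intro p; simp only [pvStkNxt, pvStk, ih]

theorem pvStkNxt_get (n : Nat) : ∀ (u : List Char) (p k : Nat), k < u.length →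
    (pvStkNxt n u p).2[k]? = some ((pvStk (u.drop k) (p + k)).headD n) := by
  intro u
  induction u with
  | nil => intro p k hk; simp at hk
  | cons ch rest ih =>
    intro p k hk
    cases k with
    | zero =>
      simp only [pvStkNxt, List.getElem?_cons_zero, List.drop_zero, Nat.add_zero,
        Option.some.injEq]
      simp only [pvStk, pvStkNxt_fst]
    | succ k' =>
      simp only [pvStkNxt, List.getElem?_cons_succ, List.drop_succ_cons]
      rw [show p + (k' + 1) = p + 1 + k' by omega]
      exact ih (p + 1) k' (by simp only [List.length_cons] at hk; omega)

-- the scan of A with x-argument p and open-'?' count c hits exactly the c-th unmatched colon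
theorem pvFindA_stk : ∀ (u : List Char) (p : Nat) (c : Nat),
    pvFindA u p ((c : Nat) : Int) = (pvStk u p)[c]? := by
  intro u
  induction u with
  | nil => intro p c; simp [pvFindA, pvStk]
  | cons ch rest ih =>
    intro p c
    by_cases h1 : ch = '?'
    · subst h1
      rw [pvFindA, if_pos rfl]
      rw [show ((c : Nat) : Int) + 1 = (((c + 1 : Nat)) : Int) by push_cast; ring]
      rw [ih (p + 1) (c + 1)]
      rw [pvStk, if_neg (by decide), if_pos rfl]
      rw [List.getElem?_drop]
      congr 1
      omega
    · by_cases h2 : ch = ':'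
      · subst h2
        rw [pvFindA, if_neg (by decide), if_pos rfl, pvStk, if_pos rfl]
        cases c with
        | zero => rw [if_pos (by norm_num)]; simp
        | succ c' =>
          rw [if_neg (by push_cast; omega)]
          rw [show ((((c' + 1 : Nat)) : Int) - 1) = ((c' : Nat) : Int) by push_cast; ring]
          rw [ih (p + 1) c']
          simp
      · rw [pvFindA, if_neg h1, if_neg h2, pvStk, if_neg h2, if_neg h1]
        exact ih (p + 1) c

-- the scan's x-argument is only a label: shifting it shifts the result
theorem pvFindA_shift : ∀ (u : List Char) (x δ : Nat) (c : Int),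
    pvFindA u (x + δ) c = (pvFindA u x c).map (· + δ) := by
  intro u
  induction u with
  | nil => intro x δ c; simp [pvFindA]
  | cons ch rest ih =>
    intro x δ c
    simp only [pvFindA]
    split_ifs with h1 h2 h3
    · rw [show x + δ + 1 = (x + 1) + δ by omega]; exact ih (x + 1) δ (c + 1)
    · simp
    · rw [show x + δ + 1 = (x + 1) + δ by omega]; exact ih (x + 1) δ (c - 1)
    · rw [show x + δ + 1 = (x + 1) + δ by omega]; exact ih (x + 1) δ c

-- scanning a truncated suffix: same break if it lies inside the window, none otherwise
theorem pvFindA_take : ∀ (u : List Char) (m x : Nat) (c : Int),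
    pvFindA (u.take m) x c = match pvFindA u x c with
      | some y => if y < x + m then some y else none
      | none => none := by
  intro u
  induction u with
  | nil => intro m x c; simp [pvFindA]
  | cons ch rest ih =>
    intro m x c
    cases m with
    | zero =>
      simp only [List.take_zero]
      cases hy : pvFindA (ch :: rest) x c with
      | none => simp [pvFindA]
      | some y =>
        have hb := pvFindA_bounds (ch :: rest) x c y hy
        simp only [pvFindA]
        rw [if_neg (by omega)]
    | succ m' =>
      rw [show x + (m' + 1) = x + 1 + m' by omega]
      simp only [List.take_succ_cons, pvFindA]
      split_ifs with h1 h2 h3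
      · exact ih m' (x + 1) (c + 1)
      · have hxm : x < x + 1 + m' := by omega
        simp [hxm]
      · exact ih m' (x + 1) (c - 1)
      · exact ih m' (x + 1) c

theorem pvHeadD (l : List Nat) (d : Nat) : l.headD d = (l[0]?).getD d := by
  cases l <;> rfl

-- the window loop of B computes exactly A's reduction sequence
theorem pvWin_eq (s : List Char) : ∀ (fuel i j : Nat), j ≤ s.length → j - i ≤ fuel →
    pvA ((s.drop i).take (j - i))
      = (s.drop (pvBWin s (pvStkNxt s.length s 0).2 fuel i j).1).take
          ((pvBWin s (pvStkNxt s.length s 0).2 fuel i j).2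
            - (pvBWin s (pvStkNxt s.length s 0).2 fuel i j).1) := by
  intro fuel
  induction fuel with
  | zero =>
    intro i j hj hfu
    have hij : j - i = 0 := by omega
    rw [pvBWin, hij]
    rw [pvA, dif_neg (by simp)]
  | succ fuel ih =>
    intro i j hj hfu
    by_cases hred : 2 < j - i
    · -- one reduction step on both sides
      have hin : i + 2 < s.length := by omega
      have hw : ((s.drop i).take (j - i)).length = j - i := by
        simp only [List.length_take, List.length_drop]; omega
      have hdrop2 : ((s.drop i).take (j - i)).drop 2 = (s.drop (i + 2)).take (j - i - 2) := by
        rw [List.drop_take, List.drop_drop]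
      have hx : (pvStkNxt s.length s 0).2.getD (i + 2) 0
          = ((pvStk (s.drop (i + 2)) (i + 2)).headD s.length) := by
        rw [List.getD_eq_getElem?_getD, pvStkNxt_get s.length s 0 (i + 2) hin]
        simp
      have hscan : pvFindA (s.drop (i + 2)) (i + 2) 0
          = (pvStk (s.drop (i + 2)) (i + 2))[0]? := by
        have := pvFindA_stk (s.drop (i + 2)) (i + 2) 0
        simpa using this
      have hchar : (PySem.List.pyGet? ((s.drop i).take (j - i)) 0).getD ' '
          = (PySem.List.pyGet? s (i : Int)).getD ' ' := by
        rw [show (0 : Int) = ((0 : Nat) : Int) by norm_num, PySem.List.pyGet?_natCast,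
          PySem.List.pyGet?_natCast]
        rw [List.getElem?_take_of_lt (by omega), List.getElem?_drop]
        simp
      cases hY : (pvStk (s.drop (i + 2)) (i + 2))[0]? with
      | none =>
        -- no unmatched colon: A's for-else returns, B breaks
        have hfull : pvFindA (s.drop (i + 2)) 2 0 = none := by
          have hsh := pvFindA_shift (s.drop (i + 2)) 2 i 0
          rw [show 2 + i = i + 2 by omega, hscan, hY] at hsh
          cases hres : pvFindA (s.drop (i + 2)) 2 0 with
          | none => rfl
          | some r => rw [hres] at hsh; simp at hsh
        have hscrut : pvFindA (((s.drop i).take (j - i)).drop 2) 2 0 = none := by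
          rw [hdrop2, pvFindA_take, hfull]
        rw [pvBWin, if_pos hred, hx, pvHeadD, hY]
        rw [if_neg (by simp only [Option.getD_none]; omega)]
        rw [pvA, dif_pos (by omega), hscrut]
      | some y =>
        have hyb : i + 2 ≤ y ∧ y < s.length := by
          have hb := pvFindA_bounds (s.drop (i + 2)) (i + 2) 0 y (by rw [hscan, hY])
          simp only [List.length_drop] at hb
          omega
        obtain ⟨r, hr, hry⟩ : ∃ r, pvFindA (s.drop (i + 2)) 2 0 = some r ∧ r + i = y := by
          have hsh := pvFindA_shift (s.drop (i + 2)) 2 i 0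
          rw [show 2 + i = i + 2 by omega, hscan, hY] at hsh
          cases hres : pvFindA (s.drop (i + 2)) 2 0 with
          | none => rw [hres] at hsh; simp at hsh
          | some r => rw [hres] at hsh; simp at hsh; exact ⟨r, rfl, hsh.symm⟩
        have hr2 : 2 ≤ r := by
          have := pvFindA_bounds (s.drop (i + 2)) 2 0 r hr
          omega
        by_cases hyj : y < j
        · -- reduction: A breaks at relative index r = y - i, B jumps via the table
          have hscrut : pvFindA (((s.drop i).take (j - i)).drop 2) 2 0 = some r := by
            rw [hdrop2, pvFindA_take, hr]
            have hrj : r < 2 + (j - i - 2) := by omega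
            simp [hrj]
          rw [pvBWin, if_pos hred, hx, pvHeadD, hY]
          rw [if_pos (by simp only [Option.getD_some]; omega)]
          rw [pvA, dif_pos (by omega), hscrut, hchar]
          simp only [Option.getD_some]
          by_cases hc : (PySem.List.pyGet? s (i : Int)).getD ' ' = 'T'
          · rw [if_pos hc, if_pos hc]
            have hsl : PySem.List.slice ((s.drop i).take (j - i)) (some (2 : Int))
                (some (r : Int)) = (s.drop (i + 2)).take (y - (i + 2)) := by
              rw [show (2 : Int) = ((2 : Nat) : Int) by norm_num, PySem.List.slice_natCast]
              rw [hdrop2, List.take_take]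
              congr 1
              omega
            rw [hsl]
            exact ih (i + 2) y (by omega) (by omega)
          · rw [if_neg hc, if_neg hc]
            have hsl : PySem.List.slice ((s.drop i).take (j - i)) (some ((r : Int) + 1)) none
                = (s.drop (y + 1)).take (j - (y + 1)) := by
              rw [show ((r : Int) + 1) = (((r + 1 : Nat)) : Int) by push_cast; ring]
              rw [PySem.List.slice_from_natCast]
              rw [List.drop_take, List.drop_drop,
                show i + (r + 1) = y + 1 by omega,
                show j - i - (r + 1) = j - (y + 1) by omega]
            rw [hsl]
            exact ih (y + 1) j hj (by omega)
        · -- the break colon lies beyond the window: A's for-else returns, B breaks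
          have hscrut : pvFindA (((s.drop i).take (j - i)).drop 2) 2 0 = none := by
            rw [hdrop2, pvFindA_take, hr]
            have hrj : ¬ r < 2 + (j - i - 2) := by omega
            simp [hrj]
          rw [pvBWin, if_pos hred, hx, pvHeadD, hY]
          rw [if_neg (by simp only [Option.getD_some]; omega)]
          rw [pvA, dif_pos (by omega), hscrut]
    · -- window of length ≤ 2: both sides stop
      rw [pvBWin, if_neg hred]
      rw [pvA, dif_neg (by simp only [List.length_take, List.length_drop]; omega)]

-- ===== VERDICT (by name: the statement is the Claim_ definition above) =====
theorem parseTernary_spec : Claim_equal_parseTernary := by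
  unfold Claim_equal_parseTernary
  intro expression _
  unfold Spec_parseTernary parseTernary parseTernary_alt
  have h := pvWin_eq expression.toList (expression.toList.length + 1) 0 expression.toList.length
    (le_refl _) (by omega)
  simp only [List.drop_zero, Nat.sub_zero, List.take_length] at h
  rw [h, PySem.List.slice_natCast]
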